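-- pv_equiv track=rewrite | github.com/krankwa/manggo-backend | mangosense/views/ml_views.py | get_treatment_for_disease
-- ===== SOURCE A (Python) =====
-- treatment_suggestions = {
--     'Anthracnose': 'The diseased twigs should be pruned and burnt along with fallen leaves. Spraying twice with Carbendazim (Bavistin 0.1%) at 15 days interval during flowering controls blossom infection.',
--     'Bacterial Canker': 'Three sprays of Streptocycline (0.01%) or Agrimycin-100 (0.01%) after first visual symptom at 10 day intervals are effective in controlling the disease.',
--     'Cutting Weevil': 'Use recommended insecticides and remove infested plant material.',
--     'Die Back': 'Pruning of the diseased twigs 2-3 inches below the affected portion and spraying Copper Oxychloride (0.3%) on infected trees controls the disease.',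
--     'Gall Midge': 'Remove and destroy infested fruits; use appropriate insecticides.',
--     'Healthy': 'No treatment needed. Maintain good agricultural practices.',
--     'Powdery Mildew': 'Alternate spraying of Wettable sulphur 0.2 per cent at 15 days interval are recommended for effective control of the disease.',
--     'Sooty Mold': 'Pruning of affected branches and their prompt destruction followed by spraying of Wettasulf (0.2%) helps to control the disease.',
--     'Black Mold Rot': 'Improve air circulation and apply fungicides as needed.',
--     'Stem End Rot': 'Proper post-harvest handling and storage conditions are essential.'
-- }
--
-- def get_treatment_for_disease(disease_name):
--     """
--     Get treatment suggestion for a disease with better error handling and debugging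
--     """
--     if not disease_name:
--         return "No treatment information available - disease name is empty."
--
--     # Direct lookup first
--     treatment = treatment_suggestions.get(disease_name)
--     if treatment:
--         return treatment
--
--     # Try case-insensitive lookup
--     disease_lower = disease_name.lower()
--     for key, value in treatment_suggestions.items():
--         if key.lower() == disease_lower:
--             return value
--
--     # Try partial match (for cases like 'Die Back' vs 'Die_Back')
--     disease_normalized = disease_name.replace('_', ' ').replace('-', ' ').strip()
--     for key, value in treatment_suggestions.items():
--         key_normalized = key.replace('_', ' ').replace('-', ' ').strip()
--         if disease_normalized.lower() == key_normalized.lower():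
--             return value
--
--     # Log available keys for debugging
--     available_keys = list(treatment_suggestions.keys())
--
--     return f"No treatment information available for '{disease_name}'. Please consult with an agricultural expert."
-- ===== SOURCE B (Python) =====
-- treatment_suggestions = {
--     'Anthracnose': 'The diseased twigs should be pruned and burnt along with fallen leaves. Spraying twice with Carbendazim (Bavistin 0.1%) at 15 days interval during flowering controls blossom infection.',
--     'Bacterial Canker': 'Three sprays of Streptocycline (0.01%) or Agrimycin-100 (0.01%) after first visual symptom at 10 day intervals are effective in controlling the disease.',
--     'Cutting Weevil': 'Use recommended insecticides and remove infested plant material.',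
--     'Die Back': 'Pruning of the diseased twigs 2-3 inches below the affected portion and spraying Copper Oxychloride (0.3%) on infected trees controls the disease.',
--     'Gall Midge': 'Remove and destroy infested fruits; use appropriate insecticides.',
--     'Healthy': 'No treatment needed. Maintain good agricultural practices.',
--     'Powdery Mildew': 'Alternate spraying of Wettable sulphur 0.2 per cent at 15 days interval are recommended for effective control of the disease.',
--     'Sooty Mold': 'Pruning of affected branches and their prompt destruction followed by spraying of Wettasulf (0.2%) helps to control the disease.',
--     'Black Mold Rot': 'Improve air circulation and apply fungicides as needed.',
--     'Stem End Rot': 'Proper post-harvest handling and storage conditions are essential.'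
-- }
--
--
-- def _normalize(name):
--     return name.replace('_', ' ').replace('-', ' ').strip().lower()
--
--
-- # Precomputed once: normalized key -> treatment.  All three of A's lookup
-- # stages agree with a single lookup here because normalization subsumes the
-- # exact and case-insensitive matches and the normalized keys are distinct.
-- _NORMALIZED_TREATMENTS = {_normalize(k): v for k, v in treatment_suggestions.items()}
--
--
-- def get_treatment_for_disease(disease_name):
--     if not disease_name:
--         return "No treatment information available - disease name is empty."
--     value = _NORMALIZED_TREATMENTS.get(_normalize(disease_name))
--     if value is not None:
--         return value
--     return f"No treatment information available for '{disease_name}'. Please consult with an agricultural expert."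
-- ===== Notes on version B (the rewrite author's own statement) =====
-- stated objective: simpler
-- what changed: A's three sequential scans (exact dict get, case-insensitive loop, underscore/hyphen-normalized loop) are replaced by a single lookup in a table keyed by the normalized key form, precomputed once at module load; the stages all agree because normalization subsumes exact and case-insensitive matching and the normalized keys are distinct.
import Mathlib
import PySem

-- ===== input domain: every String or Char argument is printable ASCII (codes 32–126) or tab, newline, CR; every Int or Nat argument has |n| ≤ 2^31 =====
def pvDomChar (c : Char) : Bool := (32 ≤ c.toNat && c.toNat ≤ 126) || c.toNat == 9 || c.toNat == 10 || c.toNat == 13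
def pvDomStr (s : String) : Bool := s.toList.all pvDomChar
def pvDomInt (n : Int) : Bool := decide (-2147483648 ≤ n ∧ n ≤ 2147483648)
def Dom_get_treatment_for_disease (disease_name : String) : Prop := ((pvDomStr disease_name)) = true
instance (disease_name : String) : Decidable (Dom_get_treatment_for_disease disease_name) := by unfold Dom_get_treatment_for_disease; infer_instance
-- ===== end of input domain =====

-- B replaces A's three sequential scans (exact, case-insensitive, normalizeKeyd) by one lookup in a
-- table of normalizeKeyd keys precomputed once at module load; objective: simpler.

-- ===== PORT A =====

-- the module-level dict literal (shared data of both Python modules)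
def tsItems : List (String × String) := [
  ("Anthracnose", "The diseased twigs should be pruned and burnt along with fallen leaves. Spraying twice with Carbendazim (Bavistin 0.1%) at 15 days interval during flowering controls blossom infection."),
  ("Bacterial Canker", "Three sprays of Streptocycline (0.01%) or Agrimycin-100 (0.01%) after first visual symptom at 10 day intervals are effective in controlling the disease."),
  ("Cutting Weevil", "Use recommended insecticides and remove infested plant material."),
  ("Die Back", "Pruning of the diseased twigs 2-3 inches below the affected portion and spraying Copper Oxychloride (0.3%) on infected trees controls the disease."),
  ("Gall Midge", "Remove and destroy infested fruits; use appropriate insecticides."),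
  ("Healthy", "No treatment needed. Maintain good agricultural practices."),
  ("Powdery Mildew", "Alternate spraying of Wettable sulphur 0.2 per cent at 15 days interval are recommended for effective control of the disease."),
  ("Sooty Mold", "Pruning of affected branches and their prompt destruction followed by spraying of Wettasulf (0.2%) helps to control the disease."),
  ("Black Mold Rot", "Improve air circulation and apply fungicides as needed."),
  ("Stem End Rot", "Proper post-harvest handling and storage conditions are essential.")]

def treatment_suggestions : PySem.Dict String String := PySem.Dict.ofList tsItems

def gtfd_fallback (disease_name : String) : String :=
  "No treatment information available for '" ++ disease_name ++ "'. Please consult with an agricultural expert."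

-- third loop: normalizeKeyd ('partial match') comparison, then the f-string fallback
def gtfd_loop3 (disease_name disease_normalizeKeyd : String) : List (String × String) → String
  | [] => gtfd_fallback disease_name
  | (k, v) :: rest =>
      let key_normalizeKeyd := PySem.Str.strip (PySem.Str.replace (PySem.Str.replace k "_" " ") "-" " ")
      if PySem.Str.lower disease_normalizeKeyd = PySem.Str.lower key_normalizeKeyd then v
      else gtfd_loop3 disease_name disease_normalizeKeyd rest

-- second loop: case-insensitive comparison; on fall-through A computes disease_normalizeKeyd and runs loop 3
def gtfd_loop2 (disease_name disease_lower : String) : List (String × String) → String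
  | [] =>
      gtfd_loop3 disease_name
        (PySem.Str.strip (PySem.Str.replace (PySem.Str.replace disease_name "_" " ") "-" " "))
        treatment_suggestions.items
  | (k, v) :: rest =>
      if PySem.Str.lower k = disease_lower then v
      else gtfd_loop2 disease_name disease_lower rest

def get_treatment_for_disease (disease_name : String) : String :=
  if disease_name = "" then "No treatment information available - disease name is empty."
  else
    match treatment_suggestions.get? disease_name with
    | some treatment =>
        if treatment ≠ "" then treatment   -- Python truthiness of the found value
        else gtfd_loop2 disease_name (PySem.Str.lower disease_name) treatment_suggestions.items
    | none => gtfd_loop2 disease_name (PySem.Str.lower disease_name) treatment_suggestions.items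

-- ===== PORT B =====

def normalizeKey (name : String) : String :=
  PySem.Str.lower (PySem.Str.strip (PySem.Str.replace (PySem.Str.replace name "_" " ") "-" " "))

-- precomputed once: {_normalizeKey(k): v for k, v in treatment_suggestions.items()}
def normalized_treatments : PySem.Dict String String :=
  PySem.Dict.ofList (treatment_suggestions.items.map (fun p => (normalizeKey p.1, p.2)))

def get_treatment_for_disease_alt (disease_name : String) : String :=
  if disease_name = "" then "No treatment information available - disease name is empty."
  else
    match normalized_treatments.get? (normalizeKey disease_name) with
    | some v => v
    | none => "No treatment information available for '" ++ disease_name ++ "'. Please consult with an agricultural expert."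

-- ===== PRECONDITION & SPEC =====
def Spec_get_treatment_for_disease (disease_name : String) (out : String) : Prop := out = get_treatment_for_disease_alt disease_name
instance (disease_name : String) (out : String) : Decidable (Spec_get_treatment_for_disease disease_name out) := by unfold Spec_get_treatment_for_disease; infer_instance

-- ===== CLAIM (what is proved, stated in full; the proofs are below) =====
def Claim_equal_get_treatment_for_disease : Prop := ∀ (disease_name : String), Dom_get_treatment_for_disease disease_name → Spec_get_treatment_for_disease disease_name (get_treatment_for_disease disease_name)

-- ===== LEMMAS AND PROOFS =====

theorem toNat_ofNat_valid (n : Nat) (h : n.isValidChar) : (Char.ofNat n).toNat = n := by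
  simp [Char.ofNat, h, Char.ofNatAux, Char.toNat, UInt32.toNat_ofNatLT]

theorem go_single (o n : Char) :
    ∀ (fuel : Nat) (l acc : List Char), l.length ≤ fuel →
      PySem.Chars.replace.go [o] [n] fuel l acc
        = acc.reverse ++ l.map (fun c => if c = o then n else c) := by
  intro fuel
  induction fuel with
  | zero =>
    intro l acc h
    have : l = [] := List.eq_nil_of_length_eq_zero (Nat.le_zero.mp h)
    subst this; simp [PySem.Chars.replace.go]
  | succ fuel ih =>
    intro l acc h
    cases l with
    | nil => simp [PySem.Chars.replace.go]
    | cons c t =>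
      simp only [PySem.Chars.replace.go]
      by_cases hc : c = o
      · subst hc
        have hp : [c].isPrefixOf (c :: t) = true := by simp [List.isPrefixOf]
        rw [if_pos hp]
        rw [ih _ _ (by simpa using Nat.le_of_succ_le_succ h)]
        simp
      · have hp : [o].isPrefixOf (c :: t) = false := by
          simp [List.isPrefixOf]; exact fun e => absurd e.symm hc
        rw [if_neg (by simp [hp])]
        rw [ih _ _ (by simpa using Nat.le_of_succ_le_succ h)]
        simp [hc]

theorem replace_single (cs : List Char) (o n : Char) :
    PySem.Chars.replace cs [o] [n] = cs.map (fun c => if c = o then n else c) := by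
  rw [PySem.Chars.replace]
  simp only [List.isEmpty_cons, if_false, Bool.false_eq_true]
  exact go_single o n cs.length cs [] (le_refl _)

theorem isspace_lowerChar (c : Char) :
    PySem.Chars.isspace (PySem.Chars.lowerChar c) = PySem.Chars.isspace c := by
  unfold PySem.Chars.lowerChar PySem.Chars.isupper
  split
  · rename_i h
    simp only [Bool.and_eq_true, decide_eq_true_eq] at h
    obtain ⟨h1, h2⟩ := h
    have h1' : 65 ≤ c.toNat := h1
    have h2' : c.toNat ≤ 90 := h2
    have hv : (Char.ofNat (c.toNat + 32)).toNat = c.toNat + 32 :=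
      toNat_ofNat_valid _ (Or.inl (by omega))
    have e1 : PySem.Chars.isspace (Char.ofNat (c.toNat + 32)) = false := by
      simp only [PySem.Chars.isspace, hv, Bool.or_eq_false_iff, Bool.and_eq_false_iff,
        decide_eq_false_iff_not]
      omega
    have e2 : PySem.Chars.isspace c = false := by
      simp only [PySem.Chars.isspace, Bool.or_eq_false_iff, Bool.and_eq_false_iff,
        decide_eq_false_iff_not]
      omega
    rw [e1, e2]
  · rfl

-- the character map performed by the two single-character replaces
def rmap2 (c : Char) : Char :=
  (fun b => if b = '-' then ' ' else b) ((fun a => if a = '_' then ' ' else a) c)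

theorem lowerChar_ne (c : Char) (d : Char) (hd : d.toNat < 97 ∨ 122 < d.toNat)
    (hcd : c ≠ d) : PySem.Chars.lowerChar c ≠ d := by
  unfold PySem.Chars.lowerChar PySem.Chars.isupper
  split
  · rename_i h
    simp only [Bool.and_eq_true, decide_eq_true_eq] at h
    obtain ⟨h1, h2⟩ := h
    have h1' : 65 ≤ c.toNat := h1
    have h2' : c.toNat ≤ 90 := h2
    have hv : (Char.ofNat (c.toNat + 32)).toNat = c.toNat + 32 :=
      toNat_ofNat_valid _ (Or.inl (by omega))
    intro e
    have : (Char.ofNat (c.toNat + 32)).toNat = d.toNat := by rw [e]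
    rw [hv] at this
    omega
  · exact hcd

theorem lowerChar_rmap2 (c : Char) :
    PySem.Chars.lowerChar (rmap2 c) = rmap2 (PySem.Chars.lowerChar c) := by
  by_cases h1 : c = '_'
  · subst h1; decide
  · by_cases h2 : c = '-'
    · subst h2; decide
    · have e1 : rmap2 c = c := by simp [rmap2, h1, h2]
      have n1 : PySem.Chars.lowerChar c ≠ '_' := lowerChar_ne c '_' (by decide) h1
      have n2 : PySem.Chars.lowerChar c ≠ '-' := lowerChar_ne c '-' (by decide) h2
      have e2 : rmap2 (PySem.Chars.lowerChar c) = PySem.Chars.lowerChar c := by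
        simp [rmap2, n1, n2]
      rw [e1, e2]

theorem rep2C_eq_map (cs : List Char) :
    PySem.Chars.replace (PySem.Chars.replace cs ['_'] [' ']) ['-'] [' '] = cs.map rmap2 := by
  rw [replace_single, replace_single, List.map_map]
  rfl

theorem lower_dropWhile (l : List Char) :
    (l.dropWhile PySem.Chars.isspace).map PySem.Chars.lowerChar
      = (l.map PySem.Chars.lowerChar).dropWhile PySem.Chars.isspace := by
  rw [List.dropWhile_map]
  rw [show PySem.Chars.isspace ∘ PySem.Chars.lowerChar = PySem.Chars.isspace from
    funext fun c => isspace_lowerChar c]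

theorem lower_strip (l : List Char) :
    PySem.Chars.lower (PySem.Chars.strip l) = PySem.Chars.strip (PySem.Chars.lower l) := by
  simp only [PySem.Chars.lower, PySem.Chars.strip, PySem.Chars.lstrip, PySem.Chars.rstrip]
  rw [List.map_reverse, lower_dropWhile, List.map_reverse, lower_dropWhile]

theorem lower_map_rmap2 (l : List Char) :
    PySem.Chars.lower (l.map rmap2) = (PySem.Chars.lower l).map rmap2 := by
  simp only [PySem.Chars.lower, List.map_map]
  exact List.map_congr_left (fun c _ => lowerChar_rmap2 c)

theorem norm_commute (cs : List Char) :
    PySem.Chars.lower (PySem.Chars.strip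
      (PySem.Chars.replace (PySem.Chars.replace cs ['_'] [' ']) ['-'] [' ']))
    = PySem.Chars.strip
        (PySem.Chars.replace (PySem.Chars.replace (PySem.Chars.lower cs) ['_'] [' ']) ['-'] [' ']) := by
  rw [rep2C_eq_map, rep2C_eq_map, lower_strip, lower_map_rmap2]

theorem normalizeKey_congr (s t : String) (h : PySem.Str.lower s = PySem.Str.lower t) :
    normalizeKey s = normalizeKey t := by
  apply String.toList_inj.mp
  have h' : PySem.Chars.lower s.toList = PySem.Chars.lower t.toList := by
    have := congrArg String.toList h
    simpa [PySem.Str.toList_lower] using this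
  simp only [normalizeKey, PySem.Str.toList_lower, PySem.Str.toList_strip, PySem.Str.toList_replace]
  rw [show ("_" : String).toList = ['_'] from rfl, show ("-" : String).toList = ['-'] from rfl,
    show (" " : String).toList = [' '] from rfl]
  rw [norm_commute, norm_commute, h']

-- ===== VERDICT (by name: the statement is the Claim_ definition above) =====
set_option maxRecDepth 100000 in
set_option maxHeartbeats 1000000 in
theorem get_treatment_for_disease_spec : Claim_equal_get_treatment_for_disease := by
  intro dn _
  unfold Spec_get_treatment_for_disease
  by_cases h0 : dn = ""
  · subst h0; rfl
  have hitems : treatment_suggestions.items = tsItems := by decide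
  have hNlit : normalized_treatments.items = List.zip ["anthracnose", "bacterial canker", "cutting weevil", "die back", "gall midge", "healthy", "powdery mildew", "sooty mold", "black mold rot", "stem end rot"] (tsItems.map Prod.snd) := by decide
  have glow1 : PySem.Str.lower "Anthracnose" = "anthracnose" := by decide
  have glow2 : PySem.Str.lower "Bacterial Canker" = "bacterial canker" := by decide
  have glow3 : PySem.Str.lower "Cutting Weevil" = "cutting weevil" := by decide
  have glow4 : PySem.Str.lower "Die Back" = "die back" := by decide
  have glow5 : PySem.Str.lower "Gall Midge" = "gall midge" := by decide
  have glow6 : PySem.Str.lower "Healthy" = "healthy" := by decide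
  have glow7 : PySem.Str.lower "Powdery Mildew" = "powdery mildew" := by decide
  have glow8 : PySem.Str.lower "Sooty Mold" = "sooty mold" := by decide
  have glow9 : PySem.Str.lower "Black Mold Rot" = "black mold rot" := by decide
  have glow10 : PySem.Str.lower "Stem End Rot" = "stem end rot" := by decide
  have gnorm1 : normalizeKey "Anthracnose" = "anthracnose" := by decide
  have gnorm2 : normalizeKey "Bacterial Canker" = "bacterial canker" := by decide
  have gnorm3 : normalizeKey "Cutting Weevil" = "cutting weevil" := by decide
  have gnorm4 : normalizeKey "Die Back" = "die back" := by decide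
  have gnorm5 : normalizeKey "Gall Midge" = "gall midge" := by decide
  have gnorm6 : normalizeKey "Healthy" = "healthy" := by decide
  have gnorm7 : normalizeKey "Powdery Mildew" = "powdery mildew" := by decide
  have gnorm8 : normalizeKey "Sooty Mold" = "sooty mold" := by decide
  have gnorm9 : normalizeKey "Black Mold Rot" = "black mold rot" := by decide
  have gnorm10 : normalizeKey "Stem End Rot" = "stem end rot" := by decide
  unfold get_treatment_for_disease get_treatment_for_disease_alt
  rw [if_neg h0, if_neg h0]
  simp only [PySem.Dict.get?, hNlit, hitems]
  by_cases hk1 : dn = "Anthracnose"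
  · subst hk1; decide
  by_cases hk2 : dn = "Bacterial Canker"
  · subst hk2; decide
  by_cases hk3 : dn = "Cutting Weevil"
  · subst hk3; decide
  by_cases hk4 : dn = "Die Back"
  · subst hk4; decide
  by_cases hk5 : dn = "Gall Midge"
  · subst hk5; decide
  by_cases hk6 : dn = "Healthy"
  · subst hk6; decide
  by_cases hk7 : dn = "Powdery Mildew"
  · subst hk7; decide
  by_cases hk8 : dn = "Sooty Mold"
  · subst hk8; decide
  by_cases hk9 : dn = "Black Mold Rot"
  · subst hk9; decide
  by_cases hk10 : dn = "Stem End Rot"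
  · subst hk10; decide
  have hf : tsItems.find? (fun p => p.1 == dn) = none := by
    have b1 := beq_eq_false_iff_ne.mpr (Ne.symm hk1)
    have b2 := beq_eq_false_iff_ne.mpr (Ne.symm hk2)
    have b3 := beq_eq_false_iff_ne.mpr (Ne.symm hk3)
    have b4 := beq_eq_false_iff_ne.mpr (Ne.symm hk4)
    have b5 := beq_eq_false_iff_ne.mpr (Ne.symm hk5)
    have b6 := beq_eq_false_iff_ne.mpr (Ne.symm hk6)
    have b7 := beq_eq_false_iff_ne.mpr (Ne.symm hk7)
    have b8 := beq_eq_false_iff_ne.mpr (Ne.symm hk8)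
    have b9 := beq_eq_false_iff_ne.mpr (Ne.symm hk9)
    have b10 := beq_eq_false_iff_ne.mpr (Ne.symm hk10)
    simp [tsItems, List.find?, b1, b2, b3, b4, b5, b6, b7, b8, b9, b10]
  rw [hf]
  simp only [Option.map_none]
  by_cases hl1 : PySem.Str.lower dn = "anthracnose"
  · have hn : normalizeKey dn = "anthracnose" := by
      rw [normalizeKey_congr dn "Anthracnose" (by rw [hl1, glow1]), gnorm1]
    rw [hl1, hn]; rfl
  by_cases hl2 : PySem.Str.lower dn = "bacterial canker"
  · have hn : normalizeKey dn = "bacterial canker" := by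
      rw [normalizeKey_congr dn "Bacterial Canker" (by rw [hl2, glow2]), gnorm2]
    rw [hl2, hn]; rfl
  by_cases hl3 : PySem.Str.lower dn = "cutting weevil"
  · have hn : normalizeKey dn = "cutting weevil" := by
      rw [normalizeKey_congr dn "Cutting Weevil" (by rw [hl3, glow3]), gnorm3]
    rw [hl3, hn]; rfl
  by_cases hl4 : PySem.Str.lower dn = "die back"
  · have hn : normalizeKey dn = "die back" := by
      rw [normalizeKey_congr dn "Die Back" (by rw [hl4, glow4]), gnorm4]
    rw [hl4, hn]; rfl
  by_cases hl5 : PySem.Str.lower dn = "gall midge"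
  · have hn : normalizeKey dn = "gall midge" := by
      rw [normalizeKey_congr dn "Gall Midge" (by rw [hl5, glow5]), gnorm5]
    rw [hl5, hn]; rfl
  by_cases hl6 : PySem.Str.lower dn = "healthy"
  · have hn : normalizeKey dn = "healthy" := by
      rw [normalizeKey_congr dn "Healthy" (by rw [hl6, glow6]), gnorm6]
    rw [hl6, hn]; rfl
  by_cases hl7 : PySem.Str.lower dn = "powdery mildew"
  · have hn : normalizeKey dn = "powdery mildew" := by
      rw [normalizeKey_congr dn "Powdery Mildew" (by rw [hl7, glow7]), gnorm7]
    rw [hl7, hn]; rfl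
  by_cases hl8 : PySem.Str.lower dn = "sooty mold"
  · have hn : normalizeKey dn = "sooty mold" := by
      rw [normalizeKey_congr dn "Sooty Mold" (by rw [hl8, glow8]), gnorm8]
    rw [hl8, hn]; rfl
  by_cases hl9 : PySem.Str.lower dn = "black mold rot"
  · have hn : normalizeKey dn = "black mold rot" := by
      rw [normalizeKey_congr dn "Black Mold Rot" (by rw [hl9, glow9]), gnorm9]
    rw [hl9, hn]; rfl
  by_cases hl10 : PySem.Str.lower dn = "stem end rot"
  · have hn : normalizeKey dn = "stem end rot" := by
      rw [normalizeKey_congr dn "Stem End Rot" (by rw [hl10, glow10]), gnorm10]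
    rw [hl10, hn]; rfl
  simp only [gtfd_loop2, tsItems, glow1, glow2, glow3, glow4, glow5, glow6, glow7, glow8, glow9, glow10]
  rw [if_neg (fun e => hl1 e.symm)]
  rw [if_neg (fun e => hl2 e.symm)]
  rw [if_neg (fun e => hl3 e.symm)]
  rw [if_neg (fun e => hl4 e.symm)]
  rw [if_neg (fun e => hl5 e.symm)]
  rw [if_neg (fun e => hl6 e.symm)]
  rw [if_neg (fun e => hl7 e.symm)]
  rw [if_neg (fun e => hl8 e.symm)]
  rw [if_neg (fun e => hl9 e.symm)]
  rw [if_neg (fun e => hl10 e.symm)]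
  rw [hitems]
  simp only [gtfd_loop3, tsItems]
  simp only [show ∀ s : String, PySem.Str.lower (PySem.Str.strip (PySem.Str.replace (PySem.Str.replace s "_" " ") "-" " ")) = normalizeKey s from fun _ => rfl]
  simp only [gnorm1, gnorm2, gnorm3, gnorm4, gnorm5, gnorm6, gnorm7, gnorm8, gnorm9, gnorm10]
  by_cases hq1 : normalizeKey dn = "anthracnose"
  · rw [if_pos hq1, hq1]; rfl
  by_cases hq2 : normalizeKey dn = "bacterial canker"
  · rw [if_neg hq1, if_pos hq2, hq2]; rfl
  by_cases hq3 : normalizeKey dn = "cutting weevil"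
  · rw [if_neg hq1, if_neg hq2, if_pos hq3, hq3]; rfl
  by_cases hq4 : normalizeKey dn = "die back"
  · rw [if_neg hq1, if_neg hq2, if_neg hq3, if_pos hq4, hq4]; rfl
  by_cases hq5 : normalizeKey dn = "gall midge"
  · rw [if_neg hq1, if_neg hq2, if_neg hq3, if_neg hq4, if_pos hq5, hq5]; rfl
  by_cases hq6 : normalizeKey dn = "healthy"
  · rw [if_neg hq1, if_neg hq2, if_neg hq3, if_neg hq4, if_neg hq5, if_pos hq6, hq6]; rfl
  by_cases hq7 : normalizeKey dn = "powdery mildew"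
  · rw [if_neg hq1, if_neg hq2, if_neg hq3, if_neg hq4, if_neg hq5, if_neg hq6, if_pos hq7, hq7]; rfl
  by_cases hq8 : normalizeKey dn = "sooty mold"
  · rw [if_neg hq1, if_neg hq2, if_neg hq3, if_neg hq4, if_neg hq5, if_neg hq6, if_neg hq7, if_pos hq8, hq8]; rfl
  by_cases hq9 : normalizeKey dn = "black mold rot"
  · rw [if_neg hq1, if_neg hq2, if_neg hq3, if_neg hq4, if_neg hq5, if_neg hq6, if_neg hq7, if_neg hq8, if_pos hq9, hq9]; rfl
  by_cases hq10 : normalizeKey dn = "stem end rot"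
  · rw [if_neg hq1, if_neg hq2, if_neg hq3, if_neg hq4, if_neg hq5, if_neg hq6, if_neg hq7, if_neg hq8, if_neg hq9, if_pos hq10, hq10]; rfl
  rw [if_neg hq1, if_neg hq2, if_neg hq3, if_neg hq4, if_neg hq5, if_neg hq6, if_neg hq7, if_neg hq8, if_neg hq9, if_neg hq10]
  have c1 := beq_eq_false_iff_ne.mpr (Ne.symm hq1)
  have c2 := beq_eq_false_iff_ne.mpr (Ne.symm hq2)
  have c3 := beq_eq_false_iff_ne.mpr (Ne.symm hq3)
  have c4 := beq_eq_false_iff_ne.mpr (Ne.symm hq4)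
  have c5 := beq_eq_false_iff_ne.mpr (Ne.symm hq5)
  have c6 := beq_eq_false_iff_ne.mpr (Ne.symm hq6)
  have c7 := beq_eq_false_iff_ne.mpr (Ne.symm hq7)
  have c8 := beq_eq_false_iff_ne.mpr (Ne.symm hq8)
  have c9 := beq_eq_false_iff_ne.mpr (Ne.symm hq9)
  have c10 := beq_eq_false_iff_ne.mpr (Ne.symm hq10)
  simp [gtfd_fallback, List.find?, List.zip_cons_cons, List.map, c1, c2, c3, c4, c5, c6, c7, c8, c9, c10]
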